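-- pv_equiv track=rewrite | github.com/daniel-reich/ubiquitous-fiesta | RTZRnXCJkfALTTdqt_10.py | sum_neg
-- ===== SOURCE A (Python) =====
-- def sum_neg(lst):
--   newlst = [0,0]
--   if lst:
--     for i in lst:
--       if i < 0:
--         newlst[1]+=i
--       else:
--         newlst[0]+=1
--     return newlst
--   else:
--     return []
-- ===== SOURCE B (Python) =====
-- def sum_neg(lst):
--   if not lst:
--     return []
--   s = sorted(lst)
--   k = 0
--   while k < len(s) and s[k] < 0:
--     k += 1
--   return [len(s) - k, sum(s[:k])]
-- ===== Notes on version B (the rewrite author's own statement) =====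
-- stated objective: alternative
-- what changed: Sort-then-scan: sorts the list, scans the sorted prefix to find the negative/non-negative boundary, then derives the count of non-negatives by subtraction and the sum of negatives as the prefix sum of a slice, replacing A's single fused two-cell accumulator loop.
import Mathlib
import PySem

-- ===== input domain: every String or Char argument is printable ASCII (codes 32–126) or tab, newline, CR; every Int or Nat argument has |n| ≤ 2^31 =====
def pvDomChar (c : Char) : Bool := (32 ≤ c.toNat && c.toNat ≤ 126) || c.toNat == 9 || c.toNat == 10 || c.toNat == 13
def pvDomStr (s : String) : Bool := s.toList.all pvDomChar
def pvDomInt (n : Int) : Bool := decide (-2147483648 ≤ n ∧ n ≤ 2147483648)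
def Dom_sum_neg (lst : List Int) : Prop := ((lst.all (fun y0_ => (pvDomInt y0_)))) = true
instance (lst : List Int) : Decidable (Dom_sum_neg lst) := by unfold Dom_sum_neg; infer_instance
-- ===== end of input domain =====

-- B is a sort-then-scan alternative to A's fused accumulator loop: sort, find the
-- negative/non-negative boundary in the sorted list, count non-negatives by subtraction
-- and sum the negatives as the prefix sum of a slice (alternative, not faster).

-- ===== PORT A =====
-- A: newlst = [0,0]; one loop mutating newlst[0]/newlst[1]; ported as a foldl over the pair of cells.
def sum_neg (lst : List Int) : List Int :=
  if lst ≠ [] then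
    let newlst := lst.foldl (fun (st : Int × Int) i =>
      if i < 0 then (st.1, st.2 + i) else (st.1 + 1, st.2)) (0, 0)
    [newlst.1, newlst.2]
  else []

-- ===== PORT B =====
-- B's while loop 'k = 0; while k < len(s) and s[k] < 0: k += 1' transcribed as the
-- structural recursion that advances past the leading negatives of s.
def scanNegLen : List Int → Nat
  | [] => 0
  | x :: xs => if x < 0 then scanNegLen xs + 1 else 0

def sum_neg_alt (lst : List Int) : List Int :=
  if lst = [] then []
  else
    let s := PySem.List.sorted lst (fun x => x) false
    let k := scanNegLen s
    [((s.length : Int) - (k : Int)), (PySem.List.slice s none (some (k : Int))).sum]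

-- ===== PRECONDITION & SPEC =====
def Spec_sum_neg (lst : List Int) (out : List Int) : Prop := out = sum_neg_alt lst
instance (lst : List Int) (out : List Int) : Decidable (Spec_sum_neg lst out) := by unfold Spec_sum_neg; infer_instance

-- ===== CLAIM (what is proved, stated in full; the proofs are below) =====
def Claim_equal_sum_neg : Prop := ∀ (lst : List Int), Dom_sum_neg lst → Spec_sum_neg lst (sum_neg lst)

-- ===== LEMMAS AND PROOFS =====

-- A's fold computes (count of non-negatives, sum of negatives).
theorem sum_neg_fold_inv (lst : List Int) (a b : Int) :
    lst.foldl (fun (st : Int × Int) i =>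
      if i < 0 then (st.1, st.2 + i) else (st.1 + 1, st.2)) (a, b)
    = (a + ((lst.filter (fun i => !(i < 0))).length : Int),
       b + (lst.filter (fun i => i < 0)).sum) := by
  induction lst generalizing a b with
  | nil => simp
  | cons x xs ih =>
    simp only [List.foldl_cons, List.filter_cons]
    by_cases h : x < 0
    · simp [h, ih]; ring
    · simp [h, ih]; omega

-- On a ≤-sorted list, the scan stops exactly at the end of the negative prefix:
-- it returns the number of negatives, and the prefix it delimits is exactly the negatives.
theorem scanNegLen_sorted (s : List Int) (h : s.Pairwise (· ≤ ·)) :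
    scanNegLen s = (s.filter (fun i => i < 0)).length ∧
    s.take (scanNegLen s) = s.filter (fun i => i < 0) := by
  induction s with
  | nil => simp [scanNegLen]
  | cons x xs ih =>
    rcases List.pairwise_cons.mp h with ⟨hx, hxs⟩
    rcases ih hxs with ⟨ih1, ih2⟩
    by_cases hneg : x < 0
    · refine ⟨by simp [scanNegLen, hneg, ih1], ?_⟩
      simp [scanNegLen, hneg, ih2]
    · have hnil : xs.filter (fun i => decide (i < 0)) = [] := by
        rw [List.filter_eq_nil_iff]
        intro y hy
        simp only [decide_eq_true_eq]
        have := hx y hy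
        omega
      simp [scanNegLen, hneg, hnil]

-- Every element is negative or not: the two filters split the length.
theorem length_filter_split (lst : List Int) :
    (lst.filter (fun i => !(i < 0))).length + (lst.filter (fun i => i < 0)).length
      = lst.length := by
  induction lst with
  | nil => simp
  | cons x xs ih => by_cases h : x < 0 <;> simp [h] <;> omega

-- ===== VERDICT (by name: the statement is the Claim_ definition above) =====
theorem sum_neg_spec : Claim_equal_sum_neg := by
  intro lst _
  unfold Spec_sum_neg sum_neg sum_neg_alt
  by_cases hnil : lst = []
  · simp [hnil]
  · simp only [hnil, ne_eq, not_false_eq_true, if_true, if_false]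
    rw [sum_neg_fold_inv]
    have hperm : (PySem.List.sorted lst (fun x => x) false).Perm lst :=
      PySem.List.sorted_perm lst (fun x => x) false
    have hpair : (PySem.List.sorted lst (fun x => x) false).Pairwise (· ≤ ·) := by
      have := PySem.List.sorted_pairwise lst (fun x => x)
      simpa using this
    rcases scanNegLen_sorted _ hpair with ⟨hlen, htake⟩
    have hpermf : ((PySem.List.sorted lst (fun x => x) false).filter (fun i => i < 0)).Perm
        (lst.filter (fun i => i < 0)) := hperm.filter _
    rw [PySem.List.slice_to_natCast, htake, hlen, hpermf.length_eq, hpermf.sum_eq,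
      hperm.length_eq]
    have hsplit := length_filter_split lst
    simp only [List.cons.injEq, zero_add]
    exact ⟨by omega, trivial⟩
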